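-- pv_equiv track=rewrite | github.com/pederwuth/azure-ai-search-with-content-understanding-python | src/content_understanding/document_processor.py | _insert_figure_contents
-- ===== SOURCE A (Python) =====
-- from typing import List, Dict, Any, Tuple, Optional
--
-- def _insert_figure_contents(
--
--     md_content: str,
--     figure_contents: List[str],
--     span_offsets: List[int]
-- ) -> str:
--     """Insert figure contents into markdown at specified offsets.
--
--     This function inserts the figure content for each of the provided figures in figure_contents
--     before the span offset of that figure in the given markdown content.
--
--     Args:
--         md_content: Original markdown content
--         figure_contents: List of figure content strings
--         span_offsets: List of span offsets (must be sorted and strictly increasing)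
--
--     Returns:
--         Modified markdown content with figure contents
--     """
--     # NOTE: In this implementation, we only alter the Markdown content returned by the Document Intelligence API,
--     # and not the per-element spans in the API response. Thus, after figure content insertion, these per-element spans will be inaccurate.
--     # This may impact use cases like citation page number calculation.
--     # Additional code may be needed to correct the spans or otherwise infer the page numbers for each citation.
--
--     # Validate span_offsets are sorted and strictly increasing
--     if span_offsets != sorted(span_offsets) or not all(
--         o < span_offsets[i + 1] for i, o in enumerate(span_offsets)
--         if i < len(span_offsets) - 1
--     ):
--         raise ValueError(
--             "span_offsets should be sorted and strictly increasing")
--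
--     # Split the content based on the provided spans
--     parts = []
--     preamble = None
--
--     for i, offset in enumerate(span_offsets):
--         if i == 0 and offset > 0:
--             preamble = md_content[0:offset]
--             # Check if we have more than one span before accessing [i + 1]
--             if i < len(span_offsets) - 1:
--                 parts.append(md_content[offset:span_offsets[i + 1]])
--             else:
--                 parts.append(md_content[offset:])
--         elif i == len(span_offsets) - 1:
--             parts.append(md_content[offset:])
--         else:
--             parts.append(md_content[offset:span_offsets[i + 1]])
--
--     # Join the parts back together with the figure content inserted
--     modified_content = ""
--     if preamble:
--         modified_content += preamble
--
--     for i, part in enumerate(parts):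
--         modified_content += f'<!-- FigureContent="{figure_contents[i]}" -->' + part
--
--     return modified_content
-- ===== SOURCE B (Python) =====
-- from typing import List
--
--
-- def _insert_figure_contents(
--     md_content: str,
--     figure_contents: List[str],
--     span_offsets: List[int]
-- ) -> str:
--     """Insert each figure's content right before its span offset, in one pass."""
--     if any(a >= b for a, b in zip(span_offsets, span_offsets[1:])):
--         raise ValueError(
--             "span_offsets should be sorted and strictly increasing")
--
--     if not span_offsets:
--         return ""
--
--     def build(figs: List[str], offs: List[int]) -> str:
--         if not figs or not offs:
--             return ""
--         end = offs[1] if len(offs) > 1 else len(md_content)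
--         return (f'<!-- FigureContent="{figs[0]}" -->'
--                 + md_content[offs[0]:end]
--                 + build(figs[1:], offs[1:]))
--
--     head = md_content[:span_offsets[0]] if span_offsets[0] > 0 else ""
--     return head + build(figure_contents, span_offsets)
-- ===== Notes on version B (the rewrite author's own statement) =====
-- stated objective: simpler
-- what changed: Replaces A's two-phase design (build a parts list plus a separate preamble variable with three-way i==0/last/middle branching, then a second indexed join loop) by a single direct recursion over (figure, offset) pairs that emits tag+slice as it goes, and replaces the sorted()+all() validation by one linear adjacent-pair scan.
import Mathlib
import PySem

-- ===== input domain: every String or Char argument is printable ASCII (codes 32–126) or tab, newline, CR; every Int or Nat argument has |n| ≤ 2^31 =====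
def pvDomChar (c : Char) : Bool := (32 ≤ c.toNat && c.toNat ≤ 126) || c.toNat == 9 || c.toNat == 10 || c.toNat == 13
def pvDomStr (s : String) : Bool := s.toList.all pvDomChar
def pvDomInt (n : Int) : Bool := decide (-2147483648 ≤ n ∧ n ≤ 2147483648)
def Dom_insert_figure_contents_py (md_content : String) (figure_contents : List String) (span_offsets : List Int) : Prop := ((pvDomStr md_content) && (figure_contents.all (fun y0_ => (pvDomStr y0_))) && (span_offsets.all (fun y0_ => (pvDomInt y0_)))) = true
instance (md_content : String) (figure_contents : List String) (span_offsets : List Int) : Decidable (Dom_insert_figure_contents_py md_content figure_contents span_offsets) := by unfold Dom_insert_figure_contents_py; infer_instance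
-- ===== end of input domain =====

-- B replaces A's two-phase parts-list/preamble machinery (with its three-way i==0 / last /
-- middle branching) by one direct recursion over (figure, offset) pairs; objective: simpler.

-- ===== PORT A =====
-- A's ValueError (offsets not strictly increasing) and IndexError (fewer figure contents than
-- offsets) paths return no value; Pre_ excludes exactly those inputs, so the port transcribes
-- the returning path.
def insert_figure_contents_py (md_content : String) (figure_contents : List String) (span_offsets : List Int) : String :=
  let st : List String × Option String :=
    (PySem.List.enumerate span_offsets).foldl (fun st io =>
      if io.1 = 0 ∧ io.2 > 0 then
        let preamble := some (PySem.Str.slice md_content (some 0) (some io.2))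
        if io.1 < (span_offsets.length : Int) - 1 then
          (st.1 ++ [PySem.Str.slice md_content (some io.2) (some (PySem.List.pyGetD span_offsets (io.1 + 1) 0))], preamble)
        else
          (st.1 ++ [PySem.Str.slice md_content (some io.2) none], preamble)
      else if io.1 = (span_offsets.length : Int) - 1 then
        (st.1 ++ [PySem.Str.slice md_content (some io.2) none], st.2)
      else
        (st.1 ++ [PySem.Str.slice md_content (some io.2) (some (PySem.List.pyGetD span_offsets (io.1 + 1) 0))], st.2))
      ([], none)
  let modified : String := match st.2 with
    | some p => if p ≠ "" then "" ++ p else ""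
    | none => ""
  (PySem.List.enumerate st.1).foldl (fun acc ip =>
      acc ++ ("<!-- FigureContent=\"" ++ PySem.List.pyGetD figure_contents ip.1 "" ++ "\" -->" ++ ip.2))
    modified

-- ===== PORT B =====
def pvBuild (md_content : String) (figs : List String) (offs : List Int) : String :=
  match figs, offs with
  | f :: fs, o :: os =>
    let e : Int := match os with
      | e :: _ => e
      | [] => PySem.Str.len md_content
    "<!-- FigureContent=\"" ++ f ++ "\" -->" ++ PySem.Str.slice md_content (some o) (some e)
      ++ pvBuild md_content fs os
  | _, _ => ""

-- B's ValueError path (offsets not strictly increasing) returns no value; Pre_ excludes it.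
def insert_figure_contents_py_alt (md_content : String) (figure_contents : List String) (span_offsets : List Int) : String :=
  match span_offsets with
  | [] => ""
  | o0 :: _ =>
    (if o0 > 0 then PySem.Str.slice md_content (some 0) (some o0) else "") ++
      pvBuild md_content figure_contents span_offsets

-- ===== PRECONDITION & SPEC =====
-- Pre_ excludes exactly the inputs where A raises: span_offsets not strictly increasing
-- (ValueError) or fewer figure contents than offsets (IndexError on figure_contents[i]).
def Pre_insert_figure_contents_py (md_content : String) (figure_contents : List String) (span_offsets : List Int) : Prop :=
  List.Pairwise (· < ·) span_offsets ∧ span_offsets.length ≤ figure_contents.length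
instance (md_content : String) (figure_contents : List String) (span_offsets : List Int) : Decidable (Pre_insert_figure_contents_py md_content figure_contents span_offsets) := by unfold Pre_insert_figure_contents_py; infer_instance

def pvWitness_insert_figure_contents_py : String × List String × List Int := ("header figA body figB tail", ["apple", "banana"], [7, 16])

def Spec_insert_figure_contents_py (md_content : String) (figure_contents : List String) (span_offsets : List Int) (out : String) : Prop := out = insert_figure_contents_py_alt md_content figure_contents span_offsets
instance (md_content : String) (figure_contents : List String) (span_offsets : List Int) (out : String) : Decidable (Spec_insert_figure_contents_py md_content figure_contents span_offsets out) := by unfold Spec_insert_figure_contents_py; infer_instance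

-- ===== CLAIM (what is proved, stated in full; the proofs are below) =====
def Claim_equal_insert_figure_contents_py : Prop := ∀ (md_content : String) (figure_contents : List String) (span_offsets : List Int), Dom_insert_figure_contents_py md_content figure_contents span_offsets → Pre_insert_figure_contents_py md_content figure_contents span_offsets → Spec_insert_figure_contents_py md_content figure_contents span_offsets (insert_figure_contents_py md_content figure_contents span_offsets)

-- ===== LEMMAS AND PROOFS =====

-- The parts list A's first loop builds: md[oᵢ:oᵢ₊₁] for middle offsets, md[oₙ₋₁:] for the last.
def pvParts (md_content : String) : List Int → List String
  | [] => []
  | [o] => [PySem.Str.slice md_content (some o) none]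
  | o :: o2 :: os => PySem.Str.slice md_content (some o) (some o2) :: pvParts md_content (o2 :: os)

-- The interleaving "tag f₀ ++ p₀ ++ tag f₁ ++ p₁ ++ …" A's second loop produces.
def pvInter : List String → List String → String
  | f :: fs, p :: ps => "<!-- FigureContent=\"" ++ f ++ "\" -->" ++ p ++ pvInter fs ps
  | _, _ => ""

theorem pvParts_length (md : String) (offs : List Int) : (pvParts md offs).length = offs.length := by
  induction offs with
  | nil => rfl
  | cons o os ih =>
    cases os with
    | nil => rfl
    | cons o2 os' => simpa [pvParts] using ih

-- md[o:len(md)] = md[o:]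
theorem pvSlice_len (md : String) (o : Int) :
    PySem.Str.slice md (some o) (some (md.length : Int)) = PySem.Str.slice md (some o) none := by
  apply String.ext
  simp [PySem.Str.toList_slice, PySem.Chars.slice_eq_listSlice,
    PySem.List.slice, PySem.List.clampIdx]
  split_ifs <;> omega

-- A's first loop, from index k ≥ 1 on: preamble untouched, parts extended by pvParts of the tail.
theorem pvLoop1_tail (md : String) (offs : List Int) :
    ∀ (os : List Int) (k : Nat), 1 ≤ k → offs.drop k = os →
    ∀ (parts : List String) (pre : Option String),
    (PySem.List.enumerate os (k : Int)).foldl (fun st io =>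
      if io.1 = 0 ∧ io.2 > 0 then
        let preamble := some (PySem.Str.slice md (some 0) (some io.2))
        if io.1 < (offs.length : Int) - 1 then
          (st.1 ++ [PySem.Str.slice md (some io.2) (some (PySem.List.pyGetD offs (io.1 + 1) 0))], preamble)
        else
          (st.1 ++ [PySem.Str.slice md (some io.2) none], preamble)
      else if io.1 = (offs.length : Int) - 1 then
        (st.1 ++ [PySem.Str.slice md (some io.2) none], st.2)
      else
        (st.1 ++ [PySem.Str.slice md (some io.2) (some (PySem.List.pyGetD offs (io.1 + 1) 0))], st.2))
      (parts, pre)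
    = (parts ++ pvParts md os, pre) := by
  intro os
  induction os with
  | nil => intro k _ _ parts pre; simp [PySem.List.enumerate, pvParts]
  | cons o os' ih =>
    intro k hk hdrop parts pre
    have hklen : k < offs.length := by
      by_contra h
      rw [List.drop_eq_nil_of_le (by omega)] at hdrop
      exact (List.cons_ne_nil o os') hdrop.symm
    have hlen : offs.length = k + 1 + os'.length := by
      have := congrArg List.length hdrop
      simp [List.length_drop] at this
      omega
    rw [PySem.List.enumerate_cons]
    cases os' with
    | nil =>
      have hk0 : ¬((k : Int) = 0 ∧ o > 0) := by
        rintro ⟨h, -⟩; omega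
      have hklast : (k : Int) = (offs.length : Int) - 1 := by
        simp only [List.length_nil] at hlen; omega
      simp only [List.foldl_cons, List.foldl_nil, PySem.List.enumerate_nil,
        eq_false hk0, eq_true hklast, if_true, if_false]
      simp [pvParts]
    | cons o2 os'' =>
      have hk0 : ¬((k : Int) = 0 ∧ o > 0) := by
        rintro ⟨h, -⟩; omega
      have hklast : ¬((k : Int) = (offs.length : Int) - 1) := by
        simp only [List.length_cons] at hlen; omega
      have hdrop' : offs.drop (k+1) = o2 :: os'' := by
        have := congrArg (List.drop 1) hdrop
        simpa [List.drop_drop, Nat.add_comm] using this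
      have h2 : offs[k+1]? = some o2 := by
        have := congrArg (fun l => l[0]?) hdrop'
        simpa using this
      have hget : PySem.List.pyGetD offs ((k : Int) + 1) 0 = o2 := by
        have hc : ((k : Int) + 1) = ((k + 1 : Nat) : Int) := by push_cast; ring
        rw [hc, PySem.List.pyGetD_natCast]
        simp [List.getD_eq_getElem?_getD, h2]
      simp only [List.foldl_cons, eq_false hk0, eq_false hklast, if_false, hget]
      have hc : ((k : Int) + 1) = ((k + 1 : Nat) : Int) := by push_cast; ring
      rw [hc, ih (k+1) (by omega) hdrop']
      simp [pvParts]

-- A's first loop on a nonempty offset list: parts = pvParts, preamble iff the first offset is > 0.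
theorem pvLoop1 (md : String) (o0 : Int) (rest : List Int) :
    (PySem.List.enumerate (o0 :: rest)).foldl (fun st io =>
      if io.1 = 0 ∧ io.2 > 0 then
        let preamble := some (PySem.Str.slice md (some 0) (some io.2))
        if io.1 < (((o0 :: rest) : List Int).length : Int) - 1 then
          (st.1 ++ [PySem.Str.slice md (some io.2) (some (PySem.List.pyGetD (o0 :: rest) (io.1 + 1) 0))], preamble)
        else
          (st.1 ++ [PySem.Str.slice md (some io.2) none], preamble)
      else if io.1 = (((o0 :: rest) : List Int).length : Int) - 1 then
        (st.1 ++ [PySem.Str.slice md (some io.2) none], st.2)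
      else
        (st.1 ++ [PySem.Str.slice md (some io.2) (some (PySem.List.pyGetD (o0 :: rest) (io.1 + 1) 0))], st.2))
      ([], none)
    = (pvParts md (o0 :: rest),
       if o0 > 0 then some (PySem.Str.slice md (some 0) (some o0)) else none) := by
  rw [PySem.List.enumerate_cons]
  have htail := pvLoop1_tail md (o0 :: rest) rest 1 (by omega) (by simp)
  cases rest with
  | nil =>
    by_cases h0 : o0 > 0 <;>
      simp [PySem.List.enumerate, pvParts, h0]
  | cons o2 rest' =>
    have htail := pvLoop1_tail md (o0 :: o2 :: rest') (o2 :: rest') 1 (by omega) (by simp)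
    have hget : PySem.List.pyGetD (o0 :: o2 :: rest') (0 + 1) 0 = o2 := by
      rw [PySem.List.pyGetD_of_nonneg _ _ (by norm_num)]; rfl
    have hlt : (0 : Int) < ((o0 :: o2 :: rest').length : Int) - 1 := by
      have : (o0 :: o2 :: rest').length = rest'.length + 2 := by simp
      omega
    have hlast : ¬((0 : Int) = ((o0 :: o2 :: rest').length : Int) - 1) := by
      have : (o0 :: o2 :: rest').length = rest'.length + 2 := by simp
      omega
    simp only [List.foldl_cons]
    by_cases h0 : o0 > 0
    · rw [if_pos (show True ∧ o0 > 0 from ⟨trivial, h0⟩), if_pos hlt, hget,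
        show (0 + 1 : Int) = ((1 : Nat) : Int) by norm_num, htail, if_pos h0]
      simp [pvParts]
    · rw [if_neg (show ¬(True ∧ o0 > 0) by simp [h0]), if_neg hlast, hget,
        show (0 + 1 : Int) = ((1 : Nat) : Int) by norm_num, htail, if_neg h0]
      simp [pvParts]

-- A's second loop from figure index k with accumulator m is m ++ the interleaving.
theorem pvLoop2 (figs : List String) :
    ∀ (parts : List String) (k : Nat) (m : String), k + parts.length ≤ figs.length →
    (PySem.List.enumerate parts (k : Int)).foldl (fun acc ip =>
      acc ++ ("<!-- FigureContent=\"" ++ PySem.List.pyGetD figs ip.1 "" ++ "\" -->" ++ ip.2)) m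
    = m ++ pvInter (figs.drop k) parts := by
  intro parts
  induction parts with
  | nil =>
    intro k m _
    cases h : figs.drop k <;> simp [PySem.List.enumerate, pvInter]
  | cons p ps ih =>
    intro k m hlen
    have hk : k < figs.length := by simp at hlen; omega
    have hdropk : figs.drop k = figs[k] :: figs.drop (k+1) := List.drop_eq_getElem_cons hk
    have hget : PySem.List.pyGetD figs (k : Int) "" = figs[k] := by
      rw [PySem.List.pyGetD_natCast]
      simp [List.getD_eq_getElem?_getD, List.getElem?_eq_getElem hk]
    rw [PySem.List.enumerate_cons]
    simp only [List.foldl_cons, hget]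
    have hc : ((k : Int) + 1) = ((k + 1 : Nat) : Int) := by push_cast; ring
    rw [hc, ih (k+1) _ (by simp at hlen ⊢; omega)]
    rw [hdropk]
    simp [pvInter, String.append_assoc]

-- B's recursion materialises exactly the interleaving of figures with A's parts.
theorem pvBuild_eq_inter (md : String) :
    ∀ (offs : List Int) (figs : List String), offs.length ≤ figs.length →
    pvBuild md figs offs = pvInter figs (pvParts md offs) := by
  intro offs
  induction offs with
  | nil => intro figs _; cases figs <;> simp [pvBuild, pvParts, pvInter]
  | cons o os ih =>
    intro figs hlen
    cases figs with
    | nil => simp at hlen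
    | cons f fs =>
      cases os with
      | nil =>
        simp [pvBuild, pvParts, pvInter, PySem.Str.len_eq, String.append_assoc, pvSlice_len]
      | cons o2 os' =>
        simp only [pvBuild, pvParts, pvInter]
        rw [ih fs (by simp at hlen ⊢; omega)]

-- ===== VERDICT (by name: the statement is the Claim_ definition above) =====
theorem insert_figure_contents_py_spec : Claim_equal_insert_figure_contents_py := by
  intro md figs offs _hdom hpre
  obtain ⟨-, hlen⟩ := hpre
  show insert_figure_contents_py md figs offs = insert_figure_contents_py_alt md figs offs
  cases offs with
  | nil => simp [insert_figure_contents_py, insert_figure_contents_py_alt, PySem.List.enumerate]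
  | cons o0 rest =>
    unfold insert_figure_contents_py insert_figure_contents_py_alt
    simp only [pvLoop1]
    have hplen : (0 : Nat) + (pvParts md (o0 :: rest)).length ≤ figs.length := by
      simpa [pvParts_length] using hlen
    by_cases h0 : o0 > 0
    · simp only [eq_true h0, if_true]
      have h2 := pvLoop2 figs (pvParts md (o0 :: rest)) 0
        (if (PySem.Str.slice md (some 0) (some o0)) ≠ "" then "" ++ PySem.Str.slice md (some 0) (some o0) else "") hplen
      rw [Nat.cast_zero, List.drop_zero] at h2
      rw [h2, pvBuild_eq_inter md _ _ hlen]
      by_cases hp : PySem.Str.slice md (some 0) (some o0) = "" <;> simp [hp]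
    · simp only [eq_false h0, if_false]
      have h2 := pvLoop2 figs (pvParts md (o0 :: rest)) 0 "" hplen
      rw [Nat.cast_zero, List.drop_zero] at h2
      rw [h2, pvBuild_eq_inter md _ _ hlen]
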